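-- pv_equiv track=rewrite | github.com/FantinBibas/vigenere | vigenere.py | index_of_coincidence
-- ===== SOURCE A (Python) =====
-- import math
-- import functools
--
-- def index_of_coincidence(cipher, top=5):
--     shifted = cipher
--     offsets = {}
--     for key_length in range(1, len(shifted) - 1):
--         offsets[key_length] = 0
--         shifted = shifted[1:]
--         for i in range(len(shifted)):
--             if cipher[i] == shifted[i]:
--                 offsets[key_length] += 1
--     best_offsets = sorted(offsets.items(), key=lambda x: (x[1], x[0]), reverse=True)
--     return functools.reduce(math.gcd, [offset for (offset, _) in best_offsets[:top]])
-- ===== SOURCE B (Python) =====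
-- import math
-- import functools
--
-- def index_of_coincidence(cipher, top=5):
--     # Group positions by character and count equal-character pairs by distance,
--     # instead of A's per-shift rescan of the whole string.
--     n = len(cipher)
--     positions = {}
--     for i, c in enumerate(cipher):
--         positions.setdefault(c, []).append(i)
--     counts = {d: 0 for d in range(1, n - 1)}
--     for pos in positions.values():
--         for a in range(len(pos)):
--             for b in range(a + 1, len(pos)):
--                 d = pos[b] - pos[a]
--                 if d <= n - 2:
--                     counts[d] += 1
--     ranked = sorted(counts, key=lambda d: (counts[d], d), reverse=True)
--     return functools.reduce(math.gcd, ranked[:top])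
-- ===== Notes on version B (the rewrite author's own statement) =====
-- stated objective: alternative
-- what changed: Instead of rescanning the whole string once per shift, B builds one dict of positions per character and counts equal-character pairs by their distance within each group (so only matching pairs are ever visited), then ranks the shift counts by (count, shift) and reduces gcd over the top shifts as A does.
import Mathlib
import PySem

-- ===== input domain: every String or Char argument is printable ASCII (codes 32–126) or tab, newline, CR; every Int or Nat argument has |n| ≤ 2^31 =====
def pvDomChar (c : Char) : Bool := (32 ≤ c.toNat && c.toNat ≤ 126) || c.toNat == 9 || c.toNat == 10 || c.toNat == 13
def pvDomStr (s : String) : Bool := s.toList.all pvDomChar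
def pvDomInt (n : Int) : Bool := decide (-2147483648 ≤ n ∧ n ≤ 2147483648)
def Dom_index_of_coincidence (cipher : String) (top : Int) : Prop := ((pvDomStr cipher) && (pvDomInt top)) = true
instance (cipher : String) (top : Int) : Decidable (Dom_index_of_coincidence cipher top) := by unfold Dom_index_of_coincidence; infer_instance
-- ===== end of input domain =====

-- B replaces A's per-shift rescan of the whole string by one dict of positions per character,
-- counting equal-character pairs by their distance, then ranking shifts and reducing gcd.

-- math.gcd on two ints (both Pythons call math.gcd)
def pyGcd (a b : Int) : Int := (Int.gcd a b : Int)

-- ===== PORT A =====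
-- loop body of A's outer `for key_length in range(1, len(shifted) - 1)` over state (shifted, offsets)
def AStep (cs : List Char) (st : List Char × PySem.Dict Int Int) (key_length : Int) :
    List Char × PySem.Dict Int Int :=
  let offsets := st.2.insert key_length 0
  let shifted := PySem.List.slice st.1 (some 1) none
  let offsets :=
    (PySem.List.pyRange 0 (PySem.List.len shifted)).foldl
      (fun off i =>
        if PySem.List.pyGetD cs i ' ' == PySem.List.pyGetD shifted i ' '
        then off.modify key_length 0 (· + 1) else off)
      offsets
  (shifted, offsets)

def index_of_coincidence (cipher : String) (top : Int) : Int :=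
  let cs := cipher.toList
  let st := (PySem.List.pyRange 1 (PySem.List.len cs - 1)).foldl (AStep cs) (cs, PySem.Dict.empty)
  let best := PySem.List.sorted2 st.2.items (fun x => x.2) (fun x => x.1) true
  match (PySem.List.slice best none (some top)).map (fun p => p.1) with
  | [] => 0   -- unreachable under Pre_: Python raises TypeError (reduce of an empty sequence) here
  | h :: t => t.foldl pyGcd h

-- ===== PORT B =====
-- loop body of B's `for pos in positions.values()` (the two inner index loops over pos)
def BStep (n : Int) (cnt : PySem.Dict Int Int) (pos : List Int) : PySem.Dict Int Int :=
  (PySem.List.pyRange 0 (PySem.List.len pos)).foldl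
    (fun cnt a =>
      (PySem.List.pyRange (a + 1) (PySem.List.len pos)).foldl
        (fun cnt b =>
          let d := PySem.List.pyGetD pos b 0 - PySem.List.pyGetD pos a 0
          if d ≤ n - 2 then cnt.modify d 0 (· + 1) else cnt)
        cnt)
    cnt

def index_of_coincidence_alt (cipher : String) (top : Int) : Int :=
  let cs := cipher.toList
  let n := PySem.List.len cs
  let positions :=
    (PySem.List.enumerate cs 0).foldl
      (fun (d : PySem.Dict Char (List Int)) p => d.modify p.2 [] (· ++ [p.1]))
      PySem.Dict.empty
  let counts0 : PySem.Dict Int Int :=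
    (PySem.List.pyRange 1 (n - 1)).foldl (fun d k => d.insert k 0) PySem.Dict.empty
  let counts := positions.values.foldl (BStep n) counts0
  let ranked := PySem.List.sorted2 counts.keys (fun d => counts.getD d 0) (fun d => d) true
  match PySem.List.slice ranked none (some top) with
  | [] => 0   -- unreachable under Pre_: Python raises TypeError (reduce of an empty sequence) here
  | h :: t => t.foldl pyGcd h

-- ===== PRECONDITION & SPEC =====
-- Pre_ holds exactly where A returns: at least 3 characters and a nonempty top slice
-- (otherwise functools.reduce gets an empty list and raises TypeError).
def Pre_index_of_coincidence (cipher : String) (top : Int) : Prop :=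
  3 ≤ PySem.Str.len cipher ∧
    (1 ≤ top ∨ (top < 0 ∧ 1 ≤ PySem.Str.len cipher - 2 + top))
instance (cipher : String) (top : Int) : Decidable (Pre_index_of_coincidence cipher top) := by
  unfold Pre_index_of_coincidence; infer_instance
def pvWitness_index_of_coincidence : String × Int := ("abcabc", 5)

def Spec_index_of_coincidence (cipher : String) (top : Int) (out : Int) : Prop :=
  out = index_of_coincidence_alt cipher top
instance (cipher : String) (top : Int) (out : Int) : Decidable (Spec_index_of_coincidence cipher top out) := by
  unfold Spec_index_of_coincidence; infer_instance

-- ===== CLAIM (what is proved, stated in full; the proofs are below) =====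
def Claim_equal_index_of_coincidence : Prop :=
  ∀ (cipher : String) (top : Int), Dom_index_of_coincidence cipher top →
    Pre_index_of_coincidence cipher top →
      Spec_index_of_coincidence cipher top (index_of_coincidence cipher top)
-- ===== LEMMAS AND PROOFS =====
theorem foldl_modify_const (k : Int) (p : Int → Bool) :
    ∀ (l : List Int) (d : PySem.Dict Int Int),
      l.foldl (fun off i => if p i then off.modify k 0 (· + 1) else off) d
        = ((l.filter p).map (fun _ => k)).foldl (fun off x => off.modify x 0 (· + 1)) d := by
  intro l
  induction l with
  | nil => intro d; rfl
  | cons x l ih =>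
    intro d
    by_cases h : p x <;> simp [h, ih]

def mcnt (cs : List Char) (k : Int) : Nat :=
  (PySem.List.pyRange 0 (PySem.List.len cs - k)).countP
    (fun i => PySem.List.pyGetD cs i ' ' == PySem.List.pyGetD cs (i + k) ' ')

theorem update_subset (s : PySem.Set Int) (l : List Int) (h : ∀ x ∈ l, x ∈ s) :
    s.update l = s := by
  rw [PySem.Set.update_eq_append_filter]
  have : (PySem.Set.ofList l).filter (fun y => !s.contains y) = [] := by
    rw [List.filter_eq_nil_iff]
    intro a ha
    rw [PySem.Set.mem_ofList] at ha
    simp [List.contains_eq_mem, h a ha]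
  rw [this, List.append_nil]

theorem pyGetD_drop (cs : List Char) (j : Nat) (i : Int) (h0 : 0 ≤ i)
    (h1 : i < (cs.length : Int) - j) :
    PySem.List.pyGetD (cs.drop j) i ' ' = PySem.List.pyGetD cs (i + j) ' ' := by
  rw [PySem.List.pyGetD_eq_getElem _ _ h0 (by simp; omega),
      PySem.List.pyGetD_eq_getElem _ _ (by omega) (by push_cast; omega)]
  rw [List.getElem_drop]
  congr 1
  omega


-- one outer iteration, from state (cs.drop m, D)
theorem AStep_spec (cs : List Char) (m : Nat) (hm : m + 2 ≤ cs.length)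
    (D : PySem.Dict Int Int) (hcont : D.contains (1 + (m : Int)) = false) :
    (AStep cs (cs.drop m, D) (1 + (m : Int))).1 = cs.drop (m + 1)
      ∧ (AStep cs (cs.drop m, D) (1 + (m : Int))).2.keys = D.keys ++ [1 + (m : Int)]
      ∧ ∀ v : Int, (AStep cs (cs.drop m, D) (1 + (m : Int))).2.getD v 0
          = if v = 1 + (m : Int) then (mcnt cs v : Int) else D.getD v 0 := by
  have hsh : PySem.List.slice (cs.drop m) (some 1) none = cs.drop (m + 1) := by
    rw [PySem.List.slice_from_one, List.tail_drop]
  unfold AStep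
  simp only [hsh]
  rw [foldl_modify_const]
  set p := fun i => PySem.List.pyGetD cs i ' ' == PySem.List.pyGetD (cs.drop (m+1)) i ' ' with hp
  set rng := PySem.List.pyRange 0 (PySem.List.len (cs.drop (m+1))) with hrng
  have hconst : ((rng.filter p).map (fun _ => (1 + (m : Int))))
      = List.replicate (rng.filter p).length (1 + (m : Int)) := by
    simp [List.map_const']
  have hkeysins : (D.insert (1 + (m : Int)) 0).keys = D.keys ++ [1 + (m : Int)] := by
    simp only [PySem.Dict.keys, PySem.Dict.items_insert_of_not_contains _ _ hcont,
      List.map_append, List.map_cons, List.map_nil]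
  have hcnt : (rng.filter p).length = mcnt cs (1 + (m : Int)) := by
    rw [← List.countP_eq_length_filter]
    unfold mcnt
    have hb : PySem.List.len (cs.drop (m+1)) = PySem.List.len cs - (1 + (m : Int)) := by
      simp [PySem.List.len_eq]; omega
    rw [hrng, hb]
    apply List.countP_congr
    intro i hi
    rw [PySem.List.mem_pyRange_one] at hi
    simp only [PySem.List.len_eq] at hi
    rw [hp]
    have : PySem.List.pyGetD (cs.drop (m+1)) i ' '
        = PySem.List.pyGetD cs (i + (m+1)) ' ' := by
      apply pyGetD_drop cs (m+1) i hi.1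
      push_cast; omega
    simp only [this]
    constructor <;> (intro h; convert h using 3 <;> push_cast <;> ring)
  refine ⟨by trivial, ?_, ?_⟩
  · rw [PySem.Dict.keys_foldl_modify, hkeysins]
    apply update_subset
    intro x hx
    rw [hconst] at hx
    have := List.eq_of_mem_replicate hx
    subst this
    simp
  · intro v
    rw [PySem.Dict.getD_foldl_modify_add_one, hconst, List.count_replicate,
      PySem.Dict.getD_insert]
    by_cases hv : v = 1 + (m : Int)
    · simp [hv, hcnt]
    · have : ((1 + (m : Int)) == v) = false := by simp [Ne.symm hv]
      simp [hv, this]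

theorem A_loop (cs : List Char) (m : Nat) (hm : m + 2 ≤ cs.length) :
    ((PySem.List.pyRange 1 (1 + (m : Int))).foldl (AStep cs) (cs, PySem.Dict.empty)).1
        = cs.drop m
      ∧ ((PySem.List.pyRange 1 (1 + (m : Int))).foldl (AStep cs) (cs, PySem.Dict.empty)).2.keys
        = PySem.List.pyRange 1 (1 + (m : Int))
      ∧ ∀ v : Int,
        ((PySem.List.pyRange 1 (1 + (m : Int))).foldl (AStep cs) (cs, PySem.Dict.empty)).2.getD v 0
          = if 1 ≤ v ∧ v < 1 + (m : Int) then (mcnt cs v : Int) else 0 := by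
  induction m with
  | zero =>
    simp [PySem.List.pyRange_one_eq_nil, PySem.Dict.getD_empty]
  | succ m ih =>
    obtain ⟨ih1, ih2, ih3⟩ := ih (by omega)
    have hsplit : PySem.List.pyRange 1 (1 + ((m + 1 : Nat) : Int))
        = PySem.List.pyRange 1 (1 + (m : Int)) ++ [1 + (m : Int)] := by
      push_cast
      rw [show (1 + ((m : Int) + 1)) = (1 + (m : Int)) + 1 by ring,
        PySem.List.pyRange_one_succ_right (by omega)]
    rw [hsplit, List.foldl_append, List.foldl_cons, List.foldl_nil]
    set prev := ((PySem.List.pyRange 1 (1 + (m : Int))).foldl (AStep cs) (cs, PySem.Dict.empty))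
      with hprev
    have hcont : prev.2.contains (1 + (m : Int)) = false := by
      rw [PySem.Dict.contains_eq_decide_mem_keys, ih2]
      simp [PySem.List.mem_pyRange_one]
    have hpair : prev = (cs.drop m, prev.2) := Prod.ext ih1 rfl
    rw [hpair]
    obtain ⟨s1, s2, s3⟩ := AStep_spec cs m (by omega) prev.2 hcont
    refine ⟨by rw [s1], ?_, ?_⟩
    · rw [s2, ih2]
    · intro v
      rw [s3 v]
      by_cases hv : v = 1 + (m : Int)
      · rw [if_pos hv, if_pos (by push_cast; omega : (1 ≤ v ∧ v < 1 + ((m+1 : Nat) : Int)))]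
      · rw [if_neg hv, ih3 v]
        have : (1 ≤ v ∧ v < 1 + (m : Int)) ↔ (1 ≤ v ∧ v < 1 + ((m+1 : Nat) : Int)) := by
          push_cast; omega
        by_cases h1 : 1 ≤ v ∧ v < 1 + (m : Int)
        · rw [if_pos h1, if_pos (this.mp h1)]
        · rw [if_neg h1, if_neg (fun hh => h1 (this.mpr hh))]

theorem A_items (cs : List Char) (h3 : 3 ≤ (cs.length : Int)) :
    ((PySem.List.pyRange 1 (PySem.List.len cs - 1)).foldl (AStep cs)
        (cs, PySem.Dict.empty)).2.items
      = (PySem.List.pyRange 1 (PySem.List.len cs - 1)).map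
          (fun k => (k, (mcnt cs k : Int))) := by
  have hm : ((cs.length - 2 : Nat) : Int) + 1 = (cs.length : Int) - 1 := by
    push_cast [Nat.cast_sub (by omega : 2 ≤ cs.length)]; ring
  have hb : PySem.List.len cs - 1 = 1 + ((cs.length - 2 : Nat) : Int) := by
    simp [PySem.List.len_eq]; omega
  rw [hb]
  obtain ⟨_, h2, hv⟩ := A_loop cs (cs.length - 2) (by omega)
  rw [PySem.Dict.items_eq_map_keys _ (by rw [h2]; exact PySem.List.nodup_pyRange_one _ _) 0, h2]
  apply List.map_congr_left
  intro k hk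
  rw [PySem.List.mem_pyRange_one] at hk
  rw [hv k, if_pos hk]

def posOf (cs : List Char) (c : Char) : List Int :=
  (PySem.List.pyRange 0 (PySem.List.len cs)).filter (fun j => PySem.List.pyGetD cs j ' ' == c)

theorem posOf_pairwise (cs : List Char) (c : Char) : (posOf cs c).Pairwise (· < ·) :=
  (PySem.List.pairwise_lt_pyRange_one _ _).sublist List.filter_sublist

theorem mem_posOf (cs : List Char) (c : Char) (x : Int) :
    x ∈ posOf cs c ↔ 0 ≤ x ∧ x < (cs.length : Int) ∧ (PySem.List.pyGetD cs x ' ' == c) := by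
  unfold posOf
  simp [List.mem_filter, PySem.List.mem_pyRange_one, and_assoc]

-- the positions dict of port B
theorem B_positions (cs : List Char) :
    ((PySem.List.enumerate cs 0).foldl
        (fun (d : PySem.Dict Char (List Int)) p => d.modify p.2 [] (· ++ [p.1]))
        PySem.Dict.empty).keys = PySem.Set.ofList cs
    ∧ ((PySem.List.enumerate cs 0).foldl
        (fun (d : PySem.Dict Char (List Int)) p => d.modify p.2 [] (· ++ [p.1]))
        PySem.Dict.empty).keys.Nodup
    ∧ ∀ c, ((PySem.List.enumerate cs 0).foldl
        (fun (d : PySem.Dict Char (List Int)) p => d.modify p.2 [] (· ++ [p.1]))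
        PySem.Dict.empty).getD c [] = posOf cs c := by
  refine ⟨?_, ?_, ?_⟩
  · rw [PySem.Dict.keys_foldl_modify_key (PySem.List.enumerate cs 0) (fun p => p.2) []
        (fun _ p => (· ++ [p.1])) PySem.Dict.empty]
    simp [PySem.Set.update_nil_left, PySem.List.map_snd_enumerate]
  · exact PySem.Dict.nodup_keys_foldl_modify_key _ _ _ _ _ (by simp [PySem.Dict.keys, PySem.Dict.empty])
  · intro c
    have hswap : ((PySem.List.enumerate cs 0).foldl
        (fun (d : PySem.Dict Char (List Int)) p => d.modify p.2 [] (· ++ [p.1]))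
        PySem.Dict.empty)
        = (((PySem.List.enumerate cs 0).map (fun p => (p.2, p.1))).foldl
            (fun (d : PySem.Dict Char (List Int)) q => d.modify q.1 [] (· ++ [q.2]))
            PySem.Dict.empty) := by
      rw [List.foldl_map]
    rw [hswap, PySem.Dict.getD_foldl_modify_append]
    rw [PySem.List.enumerate_eq_map_pyRange cs ' ']
    simp only [List.map_map, List.filter_map, List.map_map]
    simp only [PySem.Dict.getD_empty, List.nil_append]
    unfold posOf
    have : ∀ (l : List Int),
        List.map ((fun (x : Char × Int) => x.2) ∘ (fun (p : Int × Char) => (p.2, p.1)) ∘ fun j => (j, PySem.List.pyGetD cs j ' '))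
          (List.filter ((fun (p : Char × Int) => p.1 == c) ∘ (fun (p : Int × Char) => (p.2, p.1)) ∘ fun j => (j, PySem.List.pyGetD cs j ' ')) l)
          = List.filter (fun j => PySem.List.pyGetD cs j ' ' == c) l := by
      intro l
      induction l with
      | nil => rfl
      | cons x l ih =>
        by_cases h : PySem.List.pyGetD cs x ' ' == c <;>
          simp [Function.comp, List.filter_cons, h, ih]
    exact this _

theorem getD_foldl_insert_zero :
    ∀ (l : List Int) (d : PySem.Dict Int Int), (∀ v, d.getD v 0 = 0) →
      ∀ v, (l.foldl (fun d k => d.insert k 0) d).getD v 0 = 0 := by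
  intro l
  induction l with
  | nil => intro d h v; exact h v
  | cons x l ih =>
    intro d h v
    refine ih _ (fun w => ?_) v
    rw [PySem.Dict.getD_insert]
    by_cases hw : w = x <;> simp [hw, h]

theorem counts0_keys (n : Int) :
    ((PySem.List.pyRange 1 (n - 1)).foldl
        (fun (d : PySem.Dict Int Int) k => d.insert k 0) PySem.Dict.empty).keys
      = PySem.List.pyRange 1 (n - 1) := by
  rw [PySem.Dict.keys_foldl_insert _ (fun _ _ => 0)]
  have : (PySem.Dict.empty : PySem.Dict Int Int).keys = [] := by
    simp [PySem.Dict.keys, PySem.Dict.empty]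
  rw [this, PySem.Set.update_nil_left,
    PySem.Set.ofList_eq_self_of_nodup _ (PySem.List.nodup_pyRange_one _ _)]

-- 0/1 indicator sums are countP
theorem sum_ite_one {β : Type} (p : β → Bool) :
    ∀ (l : List β), (l.map (fun x => if p x then 1 else 0)).sum = l.countP p := by
  intro l
  induction l with
  | nil => rfl
  | cons x l ih =>
    by_cases h : p x <;> simp [h, ih, List.countP_cons, Nat.add_comm]

theorem sum_map_add_nat {β : Type} (f g : β → Nat) :
    ∀ (l : List β), (l.map (fun x => f x + g x)).sum = (l.map f).sum + (l.map g).sum := by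
  intro l
  induction l with
  | nil => rfl
  | cons x l ih => simp [ih]; omega

theorem countP_beq_eq_one (S : List Char) (a : Char) (hn : S.Nodup) (hm : a ∈ S) :
    S.countP (fun c => a == c) = 1 := by
  have h1 : S.countP (fun c => a == c) = S.count a := by
    rw [List.count]
    apply List.countP_congr
    intro x _
    simp [Bool.beq_comm]
  rw [h1, List.count_eq_one_of_mem hn hm]

theorem sum_count_group {β : Type} (S : List Char) (h : β → Char) (q : β → Bool) (hn : S.Nodup) :
    ∀ (l : List β), (∀ j ∈ l, h j ∈ S) →
      (S.map (fun c => l.countP (fun j => (h j == c) && q j))).sum = l.countP q := by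
  intro l
  induction l with
  | nil => simp
  | cons j l ih =>
    intro hl
    simp only [List.countP_cons]
    have : (S.map (fun c => l.countP (fun j' => (h j' == c) && q j')
        + if (h j == c) && q j then 1 else 0)).sum
        = (S.map (fun c => l.countP (fun j' => (h j' == c) && q j'))).sum
          + (S.map (fun c => if (h j == c) && q j then 1 else 0)).sum := by
      exact sum_map_add_nat _ _ S
    rw [this, ih (fun x hx => hl x (List.mem_cons_of_mem _ hx))]
    congr 1
    rw [sum_ite_one]
    by_cases hq : q j
    · simp only [hq, Bool.and_true]
      rw [countP_beq_eq_one S (h j) hn (hl j List.mem_cons_self)]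
      simp
    · simp [hq]

def pairsOf (n : Int) (pos : List Int) : List Int :=
  (PySem.List.pyRange 0 (PySem.List.len pos)).flatMap
    (fun a => ((PySem.List.pyRange (a + 1) (PySem.List.len pos)).map
        (fun b => PySem.List.pyGetD pos b 0 - PySem.List.pyGetD pos a 0)).filter
      (fun y => decide (y ≤ n - 2)))

theorem count_flatMap {β : Type} (g : β → List Int) (v : Int) :
    ∀ (l : List β), (l.flatMap g).count v = (l.map (fun x => (g x).count v)).sum := by
  intro l
  induction l with
  | nil => rfl
  | cons x l ih => simp [List.count_append, ih]

theorem mem_drop_of_mem_of_big (pos : List Int) (hp : pos.Pairwise (· < ·)) (a : Nat)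
    (ha : a < pos.length) (t : Int) (ht : pos[a] < t) (hm : t ∈ pos) :
    t ∈ pos.drop (a + 1) := by
  obtain ⟨idx, hidx, heq⟩ := List.getElem_of_mem hm
  have hgt : a < idx := by
    by_contra hle
    push_neg at hle
    rcases Nat.lt_or_ge idx a with h | h
    · have := (List.pairwise_iff_getElem.mp hp) idx a hidx ha h
      omega
    · have : idx = a := by omega
      subst this
      omega
  have hlt : idx - (a + 1) < (pos.drop (a + 1)).length := by
    simp [List.length_drop]; omega
  have : (pos.drop (a + 1))[idx - (a + 1)] = pos[idx] := by
    rw [List.getElem_drop]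
    congr 1
    omega
  rw [← heq, ← this]
  exact List.getElem_mem _

theorem inner_count (pos : List Int) (hp : pos.Pairwise (· < ·)) (a : Nat)
    (ha : a < pos.length) (v : Int) (hv1 : 1 ≤ v) :
    (PySem.List.pyRange ((a : Int) + 1) (PySem.List.len pos)).countP
        (fun b => PySem.List.pyGetD pos b 0 == pos[a] + v)
      = if pos[a] + v ∈ pos then 1 else 0 := by
  have hmap : (PySem.List.pyRange ((a : Int) + 1) (PySem.List.len pos)).map
      (fun j => PySem.List.pyGetD pos j 0) = pos.drop ((a : Int) + 1).toNat :=
    PySem.List.map_pyGetD_pyRange pos 0 (by omega)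
  have : (PySem.List.pyRange ((a : Int) + 1) (PySem.List.len pos)).countP
      (fun b => PySem.List.pyGetD pos b 0 == pos[a] + v)
      = ((PySem.List.pyRange ((a : Int) + 1) (PySem.List.len pos)).map
          (fun j => PySem.List.pyGetD pos j 0)).countP (· == pos[a] + v) := by
    rw [List.countP_map]; rfl
  rw [this, hmap]
  have htoNat : ((a : Int) + 1).toNat = a + 1 := by omega
  rw [htoNat]
  have hnd : (pos.drop (a + 1)).Nodup :=
    ((hp.imp (fun h => ne_of_lt h)).sublist (List.drop_sublist _ _))
  by_cases hm : pos[a] + v ∈ pos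
  · rw [if_pos hm, ← List.count, List.count_eq_one_of_mem hnd]
    exact mem_drop_of_mem_of_big pos hp a ha _ (by omega) hm
  · rw [if_neg hm, ← List.count, List.count_eq_zero_of_not_mem]
    intro hc
    exact hm (List.mem_of_mem_drop hc)

theorem pairs_count (n : Int) (pos : List Int) (hp : pos.Pairwise (· < ·)) (v : Int)
    (hv1 : 1 ≤ v) (hv2 : v ≤ n - 2) :
    (pairsOf n pos).count v = pos.countP (fun x => decide (x + v ∈ pos)) := by
  unfold pairsOf
  rw [count_flatMap]
  have hcongr : ∀ a ∈ PySem.List.pyRange 0 (PySem.List.len pos),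
      (((PySem.List.pyRange (a + 1) (PySem.List.len pos)).map
          (fun b => PySem.List.pyGetD pos b 0 - PySem.List.pyGetD pos a 0)).filter
        (fun y => decide (y ≤ n - 2))).count v
      = if PySem.List.pyGetD pos a 0 + v ∈ pos then 1 else 0 := by
    intro a hmem
    rw [PySem.List.mem_pyRange_one] at hmem
    simp only [PySem.List.len_eq] at hmem
    have ha : a.toNat < pos.length := by omega
    have hget : PySem.List.pyGetD pos a 0 = pos[a.toNat] :=
      PySem.List.pyGetD_eq_getElem pos 0 hmem.1 (by push_cast; omega)
    rw [List.count_filter (by simp [hv2])]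
    have h1 : (((PySem.List.pyRange (a + 1) (PySem.List.len pos)).map
        (fun b => PySem.List.pyGetD pos b 0 - PySem.List.pyGetD pos a 0))).count v
        = (PySem.List.pyRange (a + 1) (PySem.List.len pos)).countP
            (fun b => PySem.List.pyGetD pos b 0 == pos[a.toNat] + v) := by
      rw [List.count_eq_countP, List.countP_map]
      apply List.countP_congr
      intro b _
      simp only [Function.comp, beq_iff_eq, hget]
      constructor <;> (intro h; omega)
    -- h1 already in count form
    rw [h1]
    have hcast : a + 1 = ((a.toNat : Int) + 1) := by omega
    rw [hget, hcast, inner_count pos hp a.toNat ha v hv1]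
  rw [List.map_congr_left hcongr]
  have hmm : (PySem.List.pyRange 0 (PySem.List.len pos)).map
      (fun a => if PySem.List.pyGetD pos a 0 + v ∈ pos then 1 else 0)
      = ((PySem.List.pyRange 0 (PySem.List.len pos)).map
          (fun j => PySem.List.pyGetD pos j 0)).map (fun x => if x + v ∈ pos then 1 else 0) := by
    rw [List.map_map]; rfl
  rw [hmm, PySem.List.map_pyGetD_pyRange_zero]
  have := sum_ite_one (fun x => decide (x + v ∈ pos)) pos
  simp only [decide_eq_true_eq] at this ⊢
  exact this
theorem posOf_count (cs : List Char) (v : Int) (c : Char) :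
    (posOf cs c).countP (fun x => decide (x + v ∈ posOf cs c))
      = (PySem.List.pyRange 0 (PySem.List.len cs)).countP
          (fun j => (PySem.List.pyGetD cs j ' ' == c)
            && decide (j + v ∈ posOf cs (PySem.List.pyGetD cs j ' '))) := by
  unfold posOf
  rw [List.countP_filter]
  apply List.countP_congr
  intro j _
  by_cases h : PySem.List.pyGetD cs j ' ' == c
  · have : PySem.List.pyGetD cs j ' ' = c := by simpa [beq_iff_eq] using h
    simp [h, this, Bool.and_comm]
  · simp [h]

theorem DS_count (cs : List Char) (v : Int) (hv1 : 1 ≤ v)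
    (hv2 : v ≤ PySem.List.len cs - 2) :
    (((PySem.Set.ofList cs).map (posOf cs)).flatMap (pairsOf (PySem.List.len cs))).count v
      = mcnt cs v := by
  rw [count_flatMap, List.map_map]
  have hstep : ∀ c ∈ PySem.Set.ofList cs,
      ((fun x => (pairsOf (PySem.List.len cs) x).count v) ∘ posOf cs) c
        = (PySem.List.pyRange 0 (PySem.List.len cs)).countP
            (fun j => (PySem.List.pyGetD cs j ' ' == c)
              && decide (j + v ∈ posOf cs (PySem.List.pyGetD cs j ' '))) := by
    intro c _
    simp only [Function.comp]
    rw [pairs_count _ _ (posOf_pairwise cs c) v hv1 hv2, posOf_count]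
  rw [List.map_congr_left hstep]
  rw [sum_count_group (PySem.Set.ofList cs) (fun j => PySem.List.pyGetD cs j ' ')
      (fun j => decide (j + v ∈ posOf cs (PySem.List.pyGetD cs j ' ')))
      (PySem.Set.nodup_ofList cs) _ ?side]
  case side =>
    intro j hj
    rw [PySem.List.mem_pyRange_one] at hj
    simp only [PySem.List.len_eq] at hj
    rw [PySem.Set.mem_ofList]
    exact PySem.List.pyGetD_mem cs ' ' (by constructor <;> omega)
  unfold mcnt
  have hsplit : PySem.List.pyRange 0 (PySem.List.len cs)
      = PySem.List.pyRange 0 (PySem.List.len cs - v)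
        ++ PySem.List.pyRange (PySem.List.len cs - v) (PySem.List.len cs) := by
    apply PySem.List.pyRange_one_append <;> simp only [PySem.List.len_eq] at hv2 ⊢ <;> omega
  rw [hsplit, List.countP_append]
  have hz : (PySem.List.pyRange (PySem.List.len cs - v) (PySem.List.len cs)).countP
      (fun j => decide (j + v ∈ posOf cs (PySem.List.pyGetD cs j ' '))) = 0 := by
    rw [List.countP_eq_zero]
    intro j hj
    rw [PySem.List.mem_pyRange_one] at hj
    simp only [PySem.List.len_eq] at hj
    simp only [decide_eq_true_eq, mem_posOf]
    intro h
    omega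
  rw [hz, Nat.add_zero]
  apply List.countP_congr
  intro j hj
  rw [PySem.List.mem_pyRange_one] at hj
  simp only [PySem.List.len_eq] at hj hv2 ⊢
  simp only [decide_eq_true_eq, mem_posOf]
  constructor
  · intro ⟨_, _, h⟩
    simpa [Bool.beq_comm] using h
  · intro h
    exact ⟨by omega, by omega, by simpa [Bool.beq_comm] using h⟩

theorem foldl_modify_guard (n2 : Int) (f : Int → Int) :
    ∀ (l : List Int) (d : PySem.Dict Int Int),
      l.foldl (fun cnt x => if f x ≤ n2 then cnt.modify (f x) 0 (· + 1) else cnt) d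
        = ((l.map f).filter (fun y => decide (y ≤ n2))).foldl
            (fun cnt y => cnt.modify y 0 (· + 1)) d := by
  intro l
  induction l with
  | nil => intro d; rfl
  | cons x l ih =>
    intro d
    by_cases h : f x ≤ n2 <;> simp [h, ih]

theorem foldl_foldl_flatMap {β γ δ : Type} (g : β → List γ) (step : δ → γ → δ) :
    ∀ (l : List β) (init : δ),
      l.foldl (fun acc x => (g x).foldl step acc) init = (l.flatMap g).foldl step init := by
  intro l
  induction l with
  | nil => intro init; rfl
  | cons x l ih =>
    intro init
    simp [List.foldl_append, ih]

theorem BStep_eq (n : Int) (cnt : PySem.Dict Int Int) (pos : List Int) :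
    BStep n cnt pos = (pairsOf n pos).foldl (fun c y => c.modify y 0 (· + 1)) cnt := by
  unfold BStep
  have h1 : (fun (cnt : PySem.Dict Int Int) a =>
      (PySem.List.pyRange (a + 1) (PySem.List.len pos)).foldl
        (fun cnt b =>
          let d := PySem.List.pyGetD pos b 0 - PySem.List.pyGetD pos a 0
          if d ≤ n - 2 then cnt.modify d 0 (· + 1) else cnt)
        cnt)
      = (fun (cnt : PySem.Dict Int Int) a =>
          (((PySem.List.pyRange (a + 1) (PySem.List.len pos)).map
              (fun b => PySem.List.pyGetD pos b 0 - PySem.List.pyGetD pos a 0)).filter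
            (fun y => decide (y ≤ n - 2))).foldl
            (fun cnt y => cnt.modify y 0 (· + 1)) cnt) := by
    funext cnt a
    exact foldl_modify_guard (n - 2) (fun b => PySem.List.pyGetD pos b 0 - PySem.List.pyGetD pos a 0) _ cnt
  rw [h1, foldl_foldl_flatMap]
  rfl

theorem pairsOf_mem (n : Int) (pos : List Int) (hp : pos.Pairwise (· < ·)) (d : Int)
    (hd : d ∈ pairsOf n pos) : 1 ≤ d ∧ d ≤ n - 2 := by
  unfold pairsOf at hd
  rw [List.mem_flatMap] at hd
  obtain ⟨a, ha, hd⟩ := hd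
  rw [List.mem_filter] at hd
  obtain ⟨hd, hle⟩ := hd
  rw [List.mem_map] at hd
  obtain ⟨b, hb, hdef⟩ := hd
  rw [PySem.List.mem_pyRange_one] at ha hb
  simp only [PySem.List.len_eq] at ha hb
  have hga : PySem.List.pyGetD pos a 0 = pos[a.toNat] :=
    PySem.List.pyGetD_eq_getElem pos 0 (by omega) (by push_cast; omega)
  have hgb : PySem.List.pyGetD pos b 0 = pos[b.toNat] :=
    PySem.List.pyGetD_eq_getElem pos 0 (by omega) (by push_cast; omega)
  have hlt : pos[a.toNat] < pos[b.toNat] := by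
    apply List.pairwise_iff_getElem.mp hp
    omega
  refine ⟨?_, by simpa using hle⟩
  rw [← hdef, hga, hgb]
  omega

theorem insertBy_map {α β : Type} (bf : β → β → Bool) (g : α → β) (x : α) :
    ∀ (acc : List α),
      PySem.List.insertBy bf (g x) (acc.map g)
        = (PySem.List.insertBy (fun a b => bf (g a) (g b)) x acc).map g := by
  intro acc
  induction acc with
  | nil => rfl
  | cons y ys ih =>
    simp only [List.map_cons, PySem.List.insertBy]
    by_cases h : bf (g x) (g y) <;> simp [h, ih]

theorem foldl_insertBy_map {α β : Type} (bf : β → β → Bool) (g : α → β) :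
    ∀ (l acc : List α),
      (l.map g).foldl (fun acc x => PySem.List.insertBy bf x acc) (acc.map g)
        = (l.foldl (fun acc x => PySem.List.insertBy (fun a b => bf (g a) (g b)) x acc) acc).map g := by
  intro l
  induction l with
  | nil => intro acc; rfl
  | cons x xs ih =>
    intro acc
    simp only [List.map_cons, List.foldl_cons, insertBy_map]
    exact ih _

theorem sorted2_map {α β κ₁ κ₂ : Type} [LT κ₁] [DecidableLT κ₁] [LT κ₂] [DecidableLT κ₂]
    (g : α → β) (k1 : β → κ₁) (k2 : β → κ₂) (rev : Bool) (l : List α) :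
    PySem.List.sorted2 (l.map g) k1 k2 rev
      = (PySem.List.sorted2 l (fun a => k1 (g a)) (fun a => k2 (g a)) rev).map g := by
  unfold PySem.List.sorted2
  cases rev <;>
    · simp only [if_true, if_false, Bool.false_eq_true]
      exact foldl_insertBy_map _ g l []

-- congruence of sorted2 under pointwise-equal keys on the members
theorem insertBy_congr {α : Type} (bf bf' : α → α → Bool) (P : α → Prop)
    (hbf : ∀ a b, P a → P b → bf a b = bf' a b) (x : α) (hx : P x) :
    ∀ (acc : List α), (∀ a ∈ acc, P a) →
      PySem.List.insertBy bf x acc = PySem.List.insertBy bf' x acc := by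
  intro acc
  induction acc with
  | nil => intro _; rfl
  | cons y ys ih =>
    intro hmem
    simp only [PySem.List.insertBy]
    rw [hbf x y hx (hmem y List.mem_cons_self)]
    by_cases h : bf' x y <;>
      simp [h, ih (fun a ha => hmem a (List.mem_cons_of_mem _ ha))]

theorem foldl_insertBy_congr {α : Type} (bf bf' : α → α → Bool) (P : α → Prop)
    (hbf : ∀ a b, P a → P b → bf a b = bf' a b) :
    ∀ (l acc : List α), (∀ a ∈ l, P a) → (∀ a ∈ acc, P a) →
      l.foldl (fun acc x => PySem.List.insertBy bf x acc) acc
        = l.foldl (fun acc x => PySem.List.insertBy bf' x acc) acc := by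
  intro l
  induction l with
  | nil => intro acc _ _; rfl
  | cons x xs ih =>
    intro acc hl hacc
    simp only [List.foldl_cons]
    rw [insertBy_congr bf bf' P hbf x (hl x List.mem_cons_self) acc hacc]
    apply ih
    · exact fun a ha => hl a (List.mem_cons_of_mem _ ha)
    · intro a ha
      rw [PySem.List.mem_insertBy] at ha
      rcases ha with h | h
      · rw [h]; exact hl x List.mem_cons_self
      · exact hacc a h

theorem sorted2_congr {α : Type} (xs : List α) (k1 k1' : α → Int) (k2 k2' : α → Int)
    (rev : Bool) (h1 : ∀ a ∈ xs, k1 a = k1' a) (h2 : ∀ a ∈ xs, k2 a = k2' a) :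
    PySem.List.sorted2 xs k1 k2 rev = PySem.List.sorted2 xs k1' k2' rev := by
  unfold PySem.List.sorted2
  cases rev <;>
    · simp only [if_true, if_false, Bool.false_eq_true]
      apply foldl_insertBy_congr _ _ (fun a => a ∈ xs) _ xs [] (fun a ha => ha) (by simp)
      intro a b ha hb
      rw [h1 a ha, h1 b hb, h2 a ha, h2 b hb]

theorem slice_to_map {α β : Type} (f : α → β) (l : List α) (t : Int) :
    PySem.List.slice (l.map f) none (some t) = (PySem.List.slice l none (some t)).map f := by
  rcases le_or_gt 0 t with h | h
  · rw [PySem.List.slice_to _ h, PySem.List.slice_to _ h, List.map_take]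
  · have hk : 0 < (-t).toNat := by omega
    have ht : t = -(((-t).toNat : Nat) : Int) := by omega
    rw [ht, PySem.List.slice_to_neg_natCast _ _ hk, PySem.List.slice_to_neg_natCast _ _ hk,
      List.map_take, List.length_map]

def canon (cs : List Char) (top : Int) : List Int :=
  PySem.List.slice
    (PySem.List.sorted2 (PySem.List.pyRange 1 (PySem.List.len cs - 1))
      (fun v => (mcnt cs v : Int)) (fun v => v) true)
    none (some top)

theorem A_canon (cipher : String) (top : Int) (h3 : 3 ≤ (cipher.toList.length : Int)) :
    index_of_coincidence cipher top
      = match canon cipher.toList top with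
        | [] => 0
        | h :: t => t.foldl pyGcd h := by
  simp only [index_of_coincidence]
  set cs := cipher.toList with hcs
  rw [A_items cs h3]
  set R := PySem.List.pyRange 1 (PySem.List.len cs - 1) with hR
  set g : Int → Int × Int := fun k => (k, (mcnt cs k : Int)) with hg
  have hmap : R.map (fun k => (k, (mcnt cs k : Int))) = R.map g := rfl
  rw [hmap, sorted2_map g (fun x => x.2) (fun x => x.1) true R]
  have hkeys : PySem.List.sorted2 R (fun a => (g a).2) (fun a => (g a).1) true
      = PySem.List.sorted2 R (fun v => (mcnt cs v : Int)) (fun v => v) true := by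
    apply sorted2_congr <;> intro a _ <;> rfl
  rw [hkeys, slice_to_map, List.map_map]
  have hid : (PySem.List.slice
      (PySem.List.sorted2 R (fun v => (mcnt cs v : Int)) (fun v => v) true) none
      (some top)).map ((fun p : Int × Int => p.1) ∘ g)
      = canon cs top := by
    unfold canon
    rw [← hR]
    have : ((fun p : Int × Int => p.1) ∘ g) = id := by funext x; rfl
    rw [this, List.map_id]
  rw [hid]

theorem B_canon (cipher : String) (top : Int) (h3 : 3 ≤ (cipher.toList.length : Int)) :
    index_of_coincidence_alt cipher top
      = match canon cipher.toList top with
        | [] => 0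
        | h :: t => t.foldl pyGcd h := by
  simp only [index_of_coincidence_alt]
  set cs := cipher.toList with hcs
  obtain ⟨hk, hnd, hgetD⟩ := B_positions cs
  -- positions.values
  have hvals : ((PySem.List.enumerate cs 0).foldl
      (fun (d : PySem.Dict Char (List Int)) p => d.modify p.2 [] (· ++ [p.1]))
      PySem.Dict.empty).values = (PySem.Set.ofList cs).map (posOf cs) := by
    rw [PySem.Dict.values_eq_map_keys _ hnd [], hk]
    exact List.map_congr_left (fun c _ => hgetD c)
  rw [hvals]
  -- the counts fold as one modify-fold over DS
  have hBS : BStep (PySem.List.len cs)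
      = (fun cnt pos => (pairsOf (PySem.List.len cs) pos).foldl
          (fun c y => c.modify y 0 (· + 1)) cnt) := by
    funext cnt pos
    exact BStep_eq _ cnt pos
  rw [hBS, foldl_foldl_flatMap]
  set DS := ((PySem.Set.ofList cs).map (posOf cs)).flatMap (pairsOf (PySem.List.len cs))
    with hDS
  set counts0 := (PySem.List.pyRange 1 (PySem.List.len cs - 1)).foldl
      (fun (d : PySem.Dict Int Int) k => d.insert k 0) PySem.Dict.empty with hc0
  -- keys of the final counts dict
  have hDSmem : ∀ d ∈ DS, 1 ≤ d ∧ d ≤ PySem.List.len cs - 2 := by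
    intro d hd
    rw [hDS, List.mem_flatMap] at hd
    obtain ⟨pos, hpos, hd⟩ := hd
    rw [List.mem_map] at hpos
    obtain ⟨c, _, hposdef⟩ := hpos
    exact pairsOf_mem _ pos (hposdef ▸ posOf_pairwise cs c) d hd
  have hkeys : (DS.foldl (fun (c : PySem.Dict Int Int) y => c.modify y 0 (· + 1)) counts0).keys
      = PySem.List.pyRange 1 (PySem.List.len cs - 1) := by
    rw [PySem.Dict.keys_foldl_modify DS 0 (fun _ _ => (· + 1)) counts0, hc0, counts0_keys]
    apply update_subset
    intro x hx
    rw [PySem.List.mem_pyRange_one]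
    have := hDSmem x hx
    omega
  have hgd : ∀ v, (DS.foldl (fun (c : PySem.Dict Int Int) y => c.modify y 0 (· + 1)) counts0).getD v 0
      = (DS.count v : Int) := by
    intro v
    rw [PySem.Dict.getD_foldl_modify_add_one DS counts0 v]
    rw [hc0, getD_foldl_insert_zero _ _ (fun w => PySem.Dict.getD_empty w 0) v]
    omega
  -- the ranked list
  have hrank : PySem.List.sorted2
      (DS.foldl (fun (c : PySem.Dict Int Int) y => c.modify y 0 (· + 1)) counts0).keys
      (fun d => (DS.foldl (fun (c : PySem.Dict Int Int) y => c.modify y 0 (· + 1)) counts0).getD d 0)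
      (fun d => d) true
      = PySem.List.sorted2 (PySem.List.pyRange 1 (PySem.List.len cs - 1))
          (fun v => (mcnt cs v : Int)) (fun v => v) true := by
    rw [hkeys]
    apply sorted2_congr
    · intro a ha
      rw [PySem.List.mem_pyRange_one] at ha
      rw [hgd a, DS_count cs a (by omega) (by omega)]
    · intro a _; rfl
  rw [hrank]
  rfl

-- ===== VERDICT (by name: the statement is the Claim_ definition above) =====
theorem index_of_coincidence_spec : Claim_equal_index_of_coincidence := by
  unfold Claim_equal_index_of_coincidence
  intro cipher top _ hpre
  unfold Spec_index_of_coincidence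
  have h3 : 3 ≤ (cipher.toList.length : Int) := by
    have := hpre.1
    rwa [PySem.Str.len_eq] at this
  rw [A_canon cipher top h3, B_canon cipher top h3]
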